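-- pv_equiv track=rewrite | github.com/adrianmoac/clone-code-detection | originalDataset/1201556.py | bits2ranges
-- ===== SOURCE A (Python) =====
-- def bits2ranges(bits):
--     start = None
--     end   = None
--     in_range = False
--
--     for i, bit in enumerate(bits):
--         if bit:
--             if not in_range:
--                 start    = 5*i
--                 in_range = True
--         else:
--             if in_range:
--                 end      = 5*i
--                 yield (start, end)
--                 in_range = False
--
--     if in_range:
--         yield (start, 24*60)
-- ===== SOURCE B (Python) =====
-- from itertools import groupby
--
--
-- def bits2ranges(bits):
--     pending_start = None
--     for key, grp in groupby(enumerate(bits), key=lambda t: bool(t[1])):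
--         first_i = next(grp)[0]
--         if key:
--             pending_start = 5 * first_i
--         else:
--             if pending_start is not None:
--                 yield (pending_start, 5 * first_i)
--             pending_start = None
--     if pending_start is not None:
--         yield (pending_start, 24 * 60)
-- ===== Notes on version B (the rewrite author's own statement) =====
-- stated objective: idiomatic
-- what changed: B iterates over maximal runs via itertools.groupby(enumerate(bits)) keeping only a single pending_start, instead of A's element-wise loop with start/end/in_range flags.
import Mathlib
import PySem

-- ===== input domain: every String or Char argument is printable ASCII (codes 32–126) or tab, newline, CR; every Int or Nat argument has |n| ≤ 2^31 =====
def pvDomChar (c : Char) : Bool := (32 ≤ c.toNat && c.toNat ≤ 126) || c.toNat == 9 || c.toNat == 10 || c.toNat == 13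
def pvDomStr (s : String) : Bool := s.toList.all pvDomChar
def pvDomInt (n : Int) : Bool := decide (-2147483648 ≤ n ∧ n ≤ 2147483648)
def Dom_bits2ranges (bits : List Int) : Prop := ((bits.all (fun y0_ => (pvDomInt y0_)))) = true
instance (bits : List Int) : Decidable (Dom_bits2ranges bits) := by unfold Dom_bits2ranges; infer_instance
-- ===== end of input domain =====

-- B replaces A's element-wise start/end/in_range state machine by a groupby-style pass
-- over maximal runs, keeping a single pending start (objective: idiomatic).
-- Both are generators in Python; equivalence is about the yielded sequence as a list.

-- ===== PORT A =====
-- one loop step of A; state = (start, in_range, yielded-so-far).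
-- Python's `start = None` is Option Int; where A yields, in_range guarantees start is set,
-- so `.getD 0` is only a type-level default and never read on a `none`.
def pvStepA (st : Option Int × Bool × List (Int × Int)) (p : Int × Int) :
    Option Int × Bool × List (Int × Int) :=
  let (start, inq, acc) := st
  if p.2 != 0 then
    if !inq then (some (5 * p.1), true, acc) else st
  else
    if inq then (start, false, acc ++ [(start.getD 0, 5 * p.1)]) else st

def bits2ranges (bits : List Int) : List (Int × Int) :=
  let (start, inq, acc) := (PySem.List.enumerate bits).foldl pvStepA (none, false, [])
  if inq then acc ++ [(start.getD 0, 24 * 60)] else acc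

-- ===== PORT B =====
-- itertools.groupby(enumerate(bits), key=bool∘snd): key and first index of each maximal run
def pvGroupFirsts : List (Int × Int) → List (Bool × Int)
  | [] => []
  | (i, b) :: rest =>
      ((b != 0), i) :: pvGroupFirsts (rest.dropWhile (fun p => (p.2 != 0) == (b != 0)))
termination_by l => l.length
decreasing_by
  simpa using Nat.lt_succ_of_le (List.length_dropWhile_le _ _)

-- B's loop over the groups, carrying pending_start; the final `if` is the [] case
def pvLoopB : List (Bool × Int) → Option Int → List (Int × Int)
  | [], pending =>
      match pending with
      | some s => [(s, 24 * 60)]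
      | none => []
  | (key, i) :: gs, pending =>
      if key then pvLoopB gs (some (5 * i))
      else
        match pending with
        | some s => (s, 5 * i) :: pvLoopB gs none
        | none => pvLoopB gs none

def bits2ranges_alt (bits : List Int) : List (Int × Int) :=
  pvLoopB (pvGroupFirsts (PySem.List.enumerate bits)) none

-- ===== PRECONDITION & SPEC =====
def Spec_bits2ranges (bits : List Int) (out : List (Int × Int)) : Prop := out = bits2ranges_alt bits
instance (bits : List Int) (out : List (Int × Int)) : Decidable (Spec_bits2ranges bits out) := by unfold Spec_bits2ranges; infer_instance

-- ===== CLAIM (what is proved, stated in full; the proofs are below) =====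
def Claim_equal_bits2ranges : Prop := ∀ (bits : List Int), Dom_bits2ranges bits → Spec_bits2ranges bits (bits2ranges bits)

-- ===== LEMMAS AND PROOFS =====

-- A's finishing step, for stating the loop invariant
def pvFinishA (st : Option Int × Bool × List (Int × Int)) : List (Int × Int) :=
  if st.2.1 then st.2.2 ++ [(st.1.getD 0, 24 * 60)] else st.2.2

-- Within a run whose truthiness equals the current in_range flag, A's loop is a no-op.
lemma pvFoldA_run (run : List (Int × Int)) (start : Option Int) (inq : Bool)
    (acc : List (Int × Int)) (h : ∀ p ∈ run, (p.2 != 0) = inq) :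
    run.foldl pvStepA (start, inq, acc) = (start, inq, acc) := by
  induction run with
  | nil => rfl
  | cons p run ih =>
      have hp : (p.2 != 0) = inq := h p (by simp)
      have hrest : ∀ q ∈ run, (q.2 != 0) = inq := fun q hq => h q (by simp [hq])
      cases inq <;> simp [List.foldl_cons, pvStepA, hp] <;> exact ih hrest

-- Main invariant: A's loop + finish from state (start, inq, acc) equals acc ++ B's loop
-- over the remaining groups with pending = (if inq then start else none).
lemma pvMain : ∀ (n : Nat) (l : List (Int × Int)) (start : Option Int) (inq : Bool)
    (acc : List (Int × Int)),
    l.length ≤ n →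
    (inq = true → start.isSome) →
    (∀ i b, l.head? = some (i, b) → (b != 0) = true → inq = false) →
    pvFinishA (l.foldl pvStepA (start, inq, acc))
      = acc ++ pvLoopB (pvGroupFirsts l) (if inq then start else none) := by
  intro n
  induction n with
  | zero =>
      intro l start inq acc hlen hsome _
      have hl : l = [] := List.length_eq_zero_iff.mp (Nat.le_zero.mp hlen)
      subst hl
      cases inq with
      | false => simp [pvFinishA, pvGroupFirsts, pvLoopB]
      | true =>
          obtain ⟨s, hs⟩ := Option.isSome_iff_exists.mp (hsome rfl)
          subst hs
          simp [pvFinishA, pvGroupFirsts, pvLoopB]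
  | succ n ih =>
      intro l start inq acc hlen hsome hhead
      obtain _ | ⟨⟨i, b⟩, rest⟩ := l
      · cases inq with
        | false => simp [pvFinishA, pvGroupFirsts, pvLoopB]
        | true =>
            obtain ⟨s, hs⟩ := Option.isSome_iff_exists.mp (hsome rfl)
            subst hs
            simp [pvFinishA, pvGroupFirsts, pvLoopB]
      · -- split rest into the tail of this run and the remainder
        have hsplit :
            rest.takeWhile (fun p => (p.2 != 0) == (b != 0))
              ++ rest.dropWhile (fun p => (p.2 != 0) == (b != 0)) = rest :=
          List.takeWhile_append_dropWhile
        have hrun : ∀ p ∈ rest.takeWhile (fun p => (p.2 != 0) == (b != 0)),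
            (p.2 != 0) = (b != 0) := by
          intro p hp
          simpa using List.mem_takeWhile_imp hp
        have hlen' : (rest.dropWhile (fun p => (p.2 != 0) == (b != 0))).length ≤ n := by
          have h1 := List.length_dropWhile_le (fun p : Int × Int => (p.2 != 0) == (b != 0)) rest
          have h2 : rest.length + 1 ≤ n + 1 := by simpa using hlen
          omega
        have hheadDrop : ∀ i' b',
            (rest.dropWhile (fun p => (p.2 != 0) == (b != 0))).head? = some (i', b') →
            (b' != 0) = !(b != 0) := by
          intro i' b' hh
          have h := List.head?_dropWhile_not (fun p : Int × Int => (p.2 != 0) == (b != 0)) rest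
          rw [hh] at h
          cases hbb : (b != 0) <;> cases hbb' : (b' != 0) <;>
            simp only [hbb, hbb'] at h ⊢ <;> simp_all
        have hgf : pvGroupFirsts ((i, b) :: rest)
            = ((b != 0), i)
              :: pvGroupFirsts (rest.dropWhile (fun p => (p.2 != 0) == (b != 0))) := by
          rw [pvGroupFirsts]
        by_cases hb : (b != 0) = true
        · -- head of a True group: A is not in a range here (hhead)
          have hinq : inq = false := hhead i b rfl hb
          subst hinq
          have e1 : List.foldl pvStepA (start, false, acc) ((i, b) :: rest)
              = List.foldl pvStepA (some (5 * i), true, acc)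
                  (rest.dropWhile (fun p => (p.2 != 0) == (b != 0))) := by
            rw [List.foldl_cons,
              show pvStepA (start, false, acc) (i, b) = (some (5 * i), true, acc) from by
                simp [pvStepA, hb]]
            conv_lhs => rw [← hsplit]
            rw [List.foldl_append,
              pvFoldA_run _ (some (5 * i)) true acc (fun p hp => by rw [hrun p hp, hb])]
          rw [e1,
            ih _ (some (5 * i)) true acc hlen' (fun _ => rfl)
              (by
                intro i' b' hh hb'
                have h := hheadDrop i' b' hh
                rw [hb', hb] at h
                simp at h),
            hgf]
          simp [pvLoopB, hb]
        · -- head of a False group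
          have hb0 : (b != 0) = false := by simpa using hb
          cases inq with
          | false =>
              have e1 : List.foldl pvStepA (start, false, acc) ((i, b) :: rest)
                  = List.foldl pvStepA (start, false, acc)
                      (rest.dropWhile (fun p => (p.2 != 0) == (b != 0))) := by
                rw [List.foldl_cons,
                  show pvStepA (start, false, acc) (i, b) = (start, false, acc) from by
                    simp [pvStepA, hb0]]
                conv_lhs => rw [← hsplit]
                rw [List.foldl_append,
                  pvFoldA_run _ start false acc (fun p hp => by rw [hrun p hp, hb0])]
              rw [e1, ih _ start false acc hlen' (by simp) (fun _ _ _ _ => rfl), hgf]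
              simp [pvLoopB, hb0]
          | true =>
              obtain ⟨s, hs⟩ := Option.isSome_iff_exists.mp (hsome rfl)
              subst hs
              have e1 : List.foldl pvStepA (some s, true, acc) ((i, b) :: rest)
                  = List.foldl pvStepA (some s, false, acc ++ [(s, 5 * i)])
                      (rest.dropWhile (fun p => (p.2 != 0) == (b != 0))) := by
                rw [List.foldl_cons,
                  show pvStepA (some s, true, acc) (i, b)
                      = (some s, false, acc ++ [(s, 5 * i)]) from by
                    simp [pvStepA, hb0]]
                conv_lhs => rw [← hsplit]
                rw [List.foldl_append,
                  pvFoldA_run _ (some s) false _ (fun p hp => by rw [hrun p hp, hb0])]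
              rw [e1, ih _ (some s) false _ hlen' (by simp) (fun _ _ _ _ => rfl), hgf]
              simp [pvLoopB, hb0]

-- ===== VERDICT (by name: the statement is the Claim_ definition above) =====
theorem bits2ranges_spec : Claim_equal_bits2ranges := by
  intro bits _
  unfold Spec_bits2ranges bits2ranges bits2ranges_alt
  have h := pvMain (PySem.List.enumerate bits).length (PySem.List.enumerate bits)
      none false [] le_rfl (by simp) (by simp)
  simpa [pvFinishA] using h
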